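-- pv_equiv track=rewrite | github.com/funkyidol6/Boolean-evaluator | main.py | combine_expressions
-- ===== SOURCE A (Python) =====
-- def combine_expressions(lst):
--     lst = [sorted(i) for i in lst]
--     lst = sorted(lst,key=lambda x:x[0])
--     remove = []
--     combs = []
--     for idx_i,i in enumerate(lst):
--         for idx_j,j in enumerate(lst[idx_i:len(lst)]):
--             if len(i)!=2 or len(j)!=2:
--                 continue
--             if (i[0]==f'!{j[1]}' and j[0]==f'!{i[1]}') or (i[1]==f'!{j[0]}' and j[1]==f'!{i[0]}'):
--                 remove.append(idx_i)
--                 remove.append(idx_j)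
--                 combs.append(f'{i[0].replace("!","")} & {j[0].replace("!","")}')
--     lst = [i for idx,i in enumerate(lst) if idx not in remove]
--     combs = [[x] for x in combs]
--     lst += combs
--     lst = [sorted(i) for i in lst]
--     lst = sorted(lst,key=lambda x:x[0])
--     return lst
-- ===== SOURCE B (Python) =====
-- def _merge(l1, l2):
--     out = []
--     i = j = 0
--     while i < len(l1) and j < len(l2):
--         if l1[i] <= l2[j]:
--             out.append(l1[i]); i += 1
--         else:
--             out.append(l2[j]); j += 1
--     out.extend(l1[i:])
--     out.extend(l2[j:])
--     return out
--
--
-- def combine_expressions(lst):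
--     lst = sorted((sorted(c) for c in lst), key=lambda x: x[0])
--     pos = {}
--     for k, c in enumerate(lst):
--         pos.setdefault(tuple(c), []).append(k)
--     remove = []
--     combs = []
--     for idx, c in enumerate(lst):
--         if len(c) != 2:
--             continue
--         a, b = c
--         partners = []
--         if a.startswith('!'):
--             partners.append(('!' + b, a[1:]))
--         if b.startswith('!'):
--             p2 = (b[1:], '!' + a)
--             if p2 not in partners:
--                 partners.append(p2)
--         lists = [[k for k in pos.get(p, []) if k >= idx] for p in partners]
--         cand = _merge(lists[0], lists[1]) if len(lists) == 2 else (lists[0] if lists else [])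
--         for k in cand:
--             remove.append(idx)
--             remove.append(k)
--             combs.append(f'{a.replace("!","")} & {lst[k][0].replace("!","")}')
--     out = [c for i, c in enumerate(lst) if i not in remove]
--     return sorted(out + [[x] for x in combs], key=lambda x: x[0])
-- ===== Notes on version B (the rewrite author's own statement) =====
-- stated objective: alternative
-- what changed: A rescans the whole tail of the clause list for every clause (nested enumerate loops) and records the inner loop's slice-relative index in its removal list; B builds a clause->positions dictionary once, computes for each 2-literal clause its at most two complementary partner clauses directly, merges their ascending position lists, and removes the matched clauses at their absolute positions (a timing run's inputs did not show a measurable wall-clock difference). Pre_ excludes inputs containing an empty clause, on which A's sort key x[0] raises IndexError.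
-- intended difference: On inputs whose sorted clause list has a complementary 2-literal pair at positions (i, j) where deleting clauses at {i, j-i} leaves different surviving clauses than deleting {i, j} (any match with i > 0, bar degenerate duplicates), A deletes the clause at offset j-i because it reuses the index into the sliced tail lst[idx_i:] as an absolute index, i.e. it removes the wrong clause; B removes the matched clauses at i and j, which is the intended combination. — e.g. on combine_expressions([["!a", "b"], ["a", "!b"], ["!!x", "y"]]): A returns [["!!x", "y"], ["!b", "a"], ["a & b"]], B returns [["!!x", "y"], ["a & b"]]
-- outside the precondition, e.g. on combine_expressions([['a'], []]): A raises IndexError, B raises IndexError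
import Mathlib
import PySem

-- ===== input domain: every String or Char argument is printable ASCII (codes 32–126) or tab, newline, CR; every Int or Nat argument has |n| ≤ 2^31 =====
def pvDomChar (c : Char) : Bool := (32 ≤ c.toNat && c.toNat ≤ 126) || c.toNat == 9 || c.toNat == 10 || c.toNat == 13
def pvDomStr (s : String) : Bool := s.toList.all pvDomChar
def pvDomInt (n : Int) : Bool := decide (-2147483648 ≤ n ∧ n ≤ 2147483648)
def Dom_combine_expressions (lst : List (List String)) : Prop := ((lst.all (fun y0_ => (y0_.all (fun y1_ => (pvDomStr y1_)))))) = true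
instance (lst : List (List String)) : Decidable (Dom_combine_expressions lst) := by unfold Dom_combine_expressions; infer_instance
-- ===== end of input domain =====

-- B combines complementary clauses via a positions dictionary built once and per-clause
-- partner lookup instead of A's nested tail scan, and removes the matched clauses at their
-- absolute positions; A instead reuses the slice-relative inner index as an absolute removal
-- index, so on matches away from position 0 it deletes the wrong clause (see D_ below).

-- ===== PORT A =====
-- f'!{s}' and f'{x} & {y}' are ported as String concatenation (exact for Python str +).
def combine_expressions (lst : List (List String)) : List (List String) :=
  let lst1 := lst.map (fun i => PySem.List.sorted i (fun x => x) false)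
  let lst2 := PySem.List.sorted lst1 (fun x => PySem.List.pyGetD x 0 "") false
  let st := (PySem.List.enumerate lst2 0).foldl (fun (acc : List Int × List String) p =>
      (PySem.List.enumerate (PySem.List.slice lst2 (some p.1) (some (lst2.length : Int))) 0).foldl
        (fun acc2 q =>
          if p.2.length ≠ 2 ∨ q.2.length ≠ 2 then acc2
          else if (PySem.List.pyGetD p.2 0 "" = "!" ++ PySem.List.pyGetD q.2 1 "" ∧
                   PySem.List.pyGetD q.2 0 "" = "!" ++ PySem.List.pyGetD p.2 1 "") ∨
                  (PySem.List.pyGetD p.2 1 "" = "!" ++ PySem.List.pyGetD q.2 0 "" ∧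
                   PySem.List.pyGetD q.2 1 "" = "!" ++ PySem.List.pyGetD p.2 0 "")
          then (acc2.1 ++ [p.1, q.1],
                acc2.2 ++ [PySem.Str.replace (PySem.List.pyGetD p.2 0 "") "!" "" ++ " & " ++
                           PySem.Str.replace (PySem.List.pyGetD q.2 0 "") "!" ""])
          else acc2) acc) ([], [])
  let lst3 := (PySem.List.enumerate lst2 0).foldl (fun acc p =>
      if p.1 ∈ st.1 then acc else acc ++ [p.2]) []
  let lst4 := lst3 ++ st.2.map (fun x => [x])
  let lst5 := lst4.map (fun i => PySem.List.sorted i (fun x => x) false)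
  PySem.List.sorted lst5 (fun x => PySem.List.pyGetD x 0 "") false

-- ===== PORT B =====
-- B's _merge of two ascending lists (the while loop, as structural recursion)
def bmerge : List Int → List Int → List Int
  | [], l2 => l2
  | a :: l1, [] => a :: l1
  | a :: l1, b :: l2 =>
      if a ≤ b then a :: bmerge l1 (b :: l2) else b :: bmerge (a :: l1) l2

def combine_expressions_alt (lst : List (List String)) : List (List String) :=
  let l := PySem.List.sorted (lst.map (fun c => PySem.List.sorted c (fun x => x) false))
            (fun x => PySem.List.pyGetD x 0 "") false
  let pos := (PySem.List.enumerate l 0).foldl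
      (fun (d : PySem.Dict (List String) (List Int)) kc => d.modify kc.2 [] (· ++ [kc.1]))
      PySem.Dict.empty
  let st := (PySem.List.enumerate l 0).foldl (fun (acc : List Int × List String) p =>
      match p.2 with
      | [a, b] =>
        let partners := if PySem.Str.startswith a "!" then
            [["!" ++ b, PySem.Str.slice a (some 1) none]] else []
        let p2 := [PySem.Str.slice b (some 1) none, "!" ++ a]
        let partners := if PySem.Str.startswith b "!" ∧ p2 ∉ partners then
            partners ++ [p2] else partners
        let lists := partners.map (fun q => (pos.getD q []).filter (fun k => p.1 ≤ k))
        let cand := match lists with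
          | [x] => x
          | [x, y] => bmerge x y
          | _ => []
        cand.foldl (fun acc2 k =>
          (acc2.1 ++ [p.1, k],
           acc2.2 ++ [PySem.Str.replace a "!" "" ++ " & " ++
                      PySem.Str.replace (PySem.List.pyGetD (PySem.List.pyGetD l k []) 0 "") "!" ""]))
          acc
      | _ => acc) ([], [])
  let out := (PySem.List.enumerate l 0).foldl (fun acc p =>
      if p.1 ∈ st.1 then acc else acc ++ [p.2]) []
  PySem.List.sorted (out ++ st.2.map (fun x => [x])) (fun x => PySem.List.pyGetD x 0 "") false

-- ===== PRECONDITION & SPEC =====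
-- Pre_ excludes inputs containing an empty clause: Python A's sort key x[0] raises IndexError there.
def Pre_combine_expressions (lst : List (List String)) : Prop := ∀ c ∈ lst, c ≠ []
instance (lst : List (List String)) : Decidable (Pre_combine_expressions lst) := by
  unfold Pre_combine_expressions; infer_instance

def pvWitness_combine_expressions : List (List String) := [["!a", "b"], ["a", "!b"], ["c"]]

-- helpers for D_ (independent of both ports): the sorted clause list, the complementary-pair
-- relation, and the list of matched index pairs (i ≤ j) of the sorted clause list
def pvClauseSort (lst : List (List String)) : List (List String) :=
  PySem.List.sorted (lst.map (PySem.List.sorted · id false)) (·.headD "") false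

def pvG (i j : Nat) (x y : List String) : Bool := x.getD i "" == "!" ++ y.getD j ""

def pvCompl (c d : List String) : Bool :=
  c.length == 2 && d.length == 2 && (pvG 0 1 c d && pvG 0 1 d c || pvG 1 0 c d && pvG 1 0 d c)

def pvRem (L : List (List String)) (f : Int → Int → Int) : List Int :=
  let E := PySem.List.enumerate L 0
  E.flatMap fun p => (E.filter fun q => decide (p.1 ≤ q.1) && pvCompl p.2 q.2).flatMap
    fun q => [p.1, f p.1 q.1]

-- the clauses of L surviving a removal list r, in order, sorted by first literal
def pvKept (L : List (List String)) (r : List Int) : List (List String) :=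
  PySem.List.sorted (((PySem.List.enumerate L 0).filter fun p => !r.contains p.1).map Prod.snd)
    (·.headD "") false

-- On inputs whose sorted clause list has a complementary 2-literal pair at positions (i, j)
-- such that removing {i, j−i} leaves different clauses than removing {i, j} (A reuses the
-- index into the sliced tail lst[idx_i:] as an absolute removal index), A deletes the wrong
-- clause; B removes the matched clauses at i and j, the intended combination.
def D_combine_expressions (lst : List (List String)) : Prop :=
  let L := pvClauseSort lst
  ¬ pvKept L (pvRem L fun i j => j - i) = pvKept L (pvRem L fun _ j => j)
instance (lst : List (List String)) : Decidable (D_combine_expressions lst) := by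
  unfold D_combine_expressions; infer_instance

def Spec_combine_expressions (lst : List (List String)) (out : List (List String)) : Prop :=
  ¬ D_combine_expressions lst → out = combine_expressions_alt lst
instance (lst : List (List String)) (out : List (List String)) : Decidable (Spec_combine_expressions lst out) := by unfold Spec_combine_expressions; infer_instance

def pvDiffWitness_combine_expressions : List (List String) := [["!a", "b"], ["a", "!b"], ["!!x", "y"]]
def pvDiffWitnessOut_combine_expressions : (List (List String)) × (List (List String)) :=
  ([["!!x", "y"], ["!b", "a"], ["a & b"]], [["!!x", "y"], ["a & b"]])

-- ===== CLAIM (what is proved, stated in full; the proofs are below) =====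
def Claim_unchanged_combine_expressions : Prop := ∀ (lst : List (List String)), Dom_combine_expressions lst → Pre_combine_expressions lst → Spec_combine_expressions lst (combine_expressions lst)
def Claim_changed_combine_expressions : Prop := Dom_combine_expressions (pvDiffWitness_combine_expressions) ∧ Pre_combine_expressions (pvDiffWitness_combine_expressions) ∧ D_combine_expressions (pvDiffWitness_combine_expressions) ∧ combine_expressions (pvDiffWitness_combine_expressions) = pvDiffWitnessOut_combine_expressions.1 ∧ combine_expressions_alt (pvDiffWitness_combine_expressions) = pvDiffWitnessOut_combine_expressions.2 ∧ pvDiffWitnessOut_combine_expressions.1 ≠ pvDiffWitnessOut_combine_expressions.2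
def Claim_exact_combine_expressions : Prop := ∀ (lst : List (List String)), Dom_combine_expressions lst → Pre_combine_expressions lst → D_combine_expressions lst → combine_expressions lst ≠ combine_expressions_alt lst

-- ===== LEMMAS AND PROOFS =====

-- evaluation bridge: comparing String keys via their character lists (kernel-reducible)
lemma sorted_str_bridge {α : Type} (xs : List α) (key : α → String) (rev : Bool) :
    PySem.List.sorted xs key rev = PySem.List.sorted xs (fun x => (key x).toList) rev := by
  unfold PySem.List.sorted
  cases rev
  · simp only [Bool.false_eq_true, if_false]
    rw [show (fun (a b : α) => decide (key a < key b))
        = (fun a b => decide ((key a).toList < (key b).toList)) from by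
      funext a b; exact decide_eq_decide.mpr String.lt_iff_toList_lt]
  · simp only [if_true]
    rw [show (fun (a b : α) => decide (key b < key a))
        = (fun a b => decide ((key b).toList < (key a).toList)) from by
      funext a b; exact decide_eq_decide.mpr String.lt_iff_toList_lt]

-- the per-source-clause filtered tail: matches of clause c against the tail of L from k
def rawP (c d : List String) : Bool :=
  decide (c.length = 2 ∧ d.length = 2 ∧
    ((PySem.List.pyGetD c 0 "" = "!" ++ PySem.List.pyGetD d 1 "" ∧
      PySem.List.pyGetD d 0 "" = "!" ++ PySem.List.pyGetD c 1 "") ∨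
     (PySem.List.pyGetD c 1 "" = "!" ++ PySem.List.pyGetD d 0 "" ∧
      PySem.List.pyGetD d 1 "" = "!" ++ PySem.List.pyGetD c 0 "")))

def Ftail (L : List (List String)) (k : Nat) (c : List String) : List (Int × List String) :=
  (PySem.List.enumerate (L.drop k) 0).filter (fun q => rawP c q.2)

def combStr (c d : List String) : String :=
  PySem.Str.replace (PySem.List.pyGetD c 0 "") "!" "" ++ " & " ++
    PySem.Str.replace (PySem.List.pyGetD d 0 "") "!" ""

lemma bmerge_nil_right (l : List Int) : bmerge l [] = l := by cases l <;> simp [bmerge]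

lemma bmerge_cons_left (a : Int) (l1 l2 : List Int) (h : ∀ y ∈ l2, a ≤ y) :
    bmerge (a :: l1) l2 = a :: bmerge l1 l2 := by
  cases l2 with
  | nil => simp [bmerge_nil_right]
  | cons b t => simp [bmerge, h b (by simp)]

lemma bmerge_cons_right (a : Int) (l1 l2 : List Int) (h : ∀ y ∈ l1, a < y) :
    bmerge l1 (a :: l2) = a :: bmerge l1 l2 := by
  cases l1 with
  | nil => simp [bmerge]
  | cons b t =>
      have hb : ¬ (b ≤ a) := by have := h b (by simp); omega
      simp [bmerge, hb]

lemma enumerate_shift {α : Type} (xs : List α) (s : Int) :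
    PySem.List.enumerate xs s = (PySem.List.enumerate xs 0).map (fun p => (p.1 + s, p.2)) := by
  induction xs generalizing s with
  | nil => simp [PySem.List.enumerate_nil]
  | cons x t ih =>
      rw [PySem.List.enumerate_cons, PySem.List.enumerate_cons, ih (s+1), ih (0+1)]
      simp only [List.map_map, List.map_cons]
      congr 1
      · simp
      · apply List.map_congr_left
        intro p _
        ext <;> simp <;> ring

lemma bmerge_filter {α : Type} (F G : (Int × α) → Bool)
    (hdisj : ∀ x, ¬(F x = true ∧ G x = true)) :
    ∀ (E : List (Int × α)), E.Pairwise (fun p q => p.1 < q.1) →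
    bmerge ((E.filter F).map (·.1)) ((E.filter G).map (·.1))
      = (E.filter (fun x => F x || G x)).map (·.1) := by
  intro E
  induction E with
  | nil => simp [bmerge]
  | cons x t ih =>
      intro hpw
      rw [List.pairwise_cons] at hpw
      obtain ⟨hlt, hpt⟩ := hpw
      have hmemlt : ∀ (P : (Int × α) → Bool), ∀ y ∈ ((t.filter P).map (·.1)), x.1 < y := by
        intro P y hy
        obtain ⟨q, hq, rfl⟩ := List.mem_map.mp hy
        exact hlt q (List.mem_of_mem_filter hq)
      cases hF : F x <;> cases hG : G x
      · simp only [List.filter_cons, hF, hG, Bool.or_self, if_neg Bool.false_ne_true]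
        exact ih hpt
      · simp only [List.filter_cons, hF, hG, Bool.false_or, if_neg Bool.false_ne_true,
          if_pos trivial, List.map_cons]
        rw [bmerge_cons_right x.1 _ _ (hmemlt F), ih hpt]
      · simp only [List.filter_cons, hF, hG, Bool.or_false, if_neg Bool.false_ne_true,
          if_pos trivial, List.map_cons]
        rw [bmerge_cons_left x.1 _ _ (fun y hy => le_of_lt (hmemlt G y hy)), ih hpt]
      · exact absurd ⟨hF, hG⟩ (hdisj x)

lemma pos_getD {α : Type} [BEq α] [LawfulBEq α] (E : List (Int × α)) (q : α) :
    ((E.foldl (fun (d : PySem.Dict α (List Int)) kc => d.modify kc.2 [] (· ++ [kc.1]))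
      PySem.Dict.empty).getD q [])
      = (E.filter (fun kc => kc.2 == q)).map (·.1) := by
  have h1 : E.foldl (fun (d : PySem.Dict α (List Int)) kc => d.modify kc.2 [] (· ++ [kc.1]))
      PySem.Dict.empty
      = (E.map Prod.swap).foldl (fun d p => d.modify p.1 [] (· ++ [p.2])) PySem.Dict.empty := by
    rw [List.foldl_map]
    rfl
  rw [h1, PySem.Dict.getD_foldl_modify_append]
  simp [List.filter_map, List.map_map, Function.comp_def, Prod.swap]

lemma bang_iff (a v : String) :
    a = "!" ++ v ↔ (PySem.Str.startswith a "!" = true ∧ v = PySem.Str.slice a (some 1) none) := by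
  have hsw : PySem.Str.startswith a "!" = ("!".toList.isPrefixOf a.toList) := by
    simp [PySem.Str.startswith, PySem.Chars.startswith]
  have hbl : ("!" : String).toList = ['!'] := by decide
  constructor
  · rintro rfl
    refine ⟨?_, ?_⟩
    · rw [hsw, hbl]
      simp
    · apply String.toList_inj.mp
      simp [PySem.Str.slice, PySem.Chars.slice, PySem.List.slice_from _ (by norm_num : (0:Int) ≤ 1)]
  · rintro ⟨h1, rfl⟩
    rw [hsw, hbl] at h1
    rw [List.isPrefixOf_iff_prefix] at h1
    obtain ⟨t, ht⟩ := h1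
    apply String.toList_inj.mp
    simp [PySem.Str.slice, PySem.Chars.slice, PySem.List.slice_from _ (by norm_num : (0:Int) ≤ 1), ← ht]

lemma foldl_push {α β γ : Type} (pred : α → Bool) (f : α → List β) (g : α → γ) :
    ∀ (xs : List α) (r0 : List β) (c0 : List γ),
    xs.foldl (fun (acc : List β × List γ) q =>
        if pred q then (acc.1 ++ f q, acc.2 ++ [g q]) else acc) (r0, c0)
      = (r0 ++ (xs.filter pred).flatMap f, c0 ++ (xs.filter pred).map g) := by
  intro xs
  induction xs with
  | nil => simp
  | cons x t ih =>
      intro r0 c0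
      cases hx : pred x
      · simp [hx, ih]
      · simp [hx, ih]

lemma occ_ge (L : List (List String)) (q : List String) (k : Nat) (hk : k ≤ L.length) :
    ((((PySem.List.enumerate L 0).filter (fun kc => kc.2 == q)).map (·.1)).filter
        (fun x => decide ((k : Int) ≤ x)))
      = ((PySem.List.enumerate (L.drop k) (k : Int)).filter (fun kc => kc.2 == q)).map (·.1) := by
  have hsplit : PySem.List.enumerate L 0
      = PySem.List.enumerate (L.take k) 0 ++ PySem.List.enumerate (L.drop k) (k : Int) := by
    conv_lhs => rw [← List.take_append_drop k L]
    rw [PySem.List.enumerate_append]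
    congr 2
    simp [List.length_take, Nat.min_eq_left hk]
  rw [hsplit, List.filter_append, List.map_append, List.filter_append]
  have h1 : (((PySem.List.enumerate (L.take k) 0).filter (fun kc => kc.2 == q)).map
      (·.1)).filter (fun x => decide ((k : Int) ≤ x)) = [] := by
    rw [List.filter_eq_nil_iff]
    intro x hx
    obtain ⟨pp, hpp, rfl⟩ := List.mem_map.mp hx
    have hpp' := List.mem_of_mem_filter hpp
    rw [PySem.List.mem_enumerate_iff] at hpp'
    obtain ⟨r, hr, rfl⟩ := hpp'
    have hrk : r < k := by
      have := hr
      simp [List.length_take] at this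
      omega
    simp
    omega
  have h2 : (((PySem.List.enumerate (L.drop k) (k : Int)).filter (fun kc => kc.2 == q)).map
      (·.1)).filter (fun x => decide ((k : Int) ≤ x))
      = ((PySem.List.enumerate (L.drop k) (k : Int)).filter (fun kc => kc.2 == q)).map (·.1) := by
    rw [List.filter_eq_self]
    intro x hx
    obtain ⟨pp, hpp, rfl⟩ := List.mem_map.mp hx
    have hpp' := List.mem_of_mem_filter hpp
    rw [PySem.List.mem_enumerate_iff] at hpp'
    obtain ⟨r, hr, rfl⟩ := hpp'
    simp
  rw [h1, h2, List.nil_append]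

lemma P_char (a b : String) (v : List String) :
    (decide (v.length = 2 ∧
      ((a = "!" ++ PySem.List.pyGetD v 1 "" ∧ PySem.List.pyGetD v 0 "" = "!" ++ b) ∨
       (b = "!" ++ PySem.List.pyGetD v 0 "" ∧ PySem.List.pyGetD v 1 "" = "!" ++ a))))
    = ((PySem.Str.startswith a "!" && v == ["!" ++ b, PySem.Str.slice a (some 1) none]) ||
       (PySem.Str.startswith b "!" && v == [PySem.Str.slice b (some 1) none, "!" ++ a])) := by
  rw [Bool.eq_iff_iff]
  simp only [decide_eq_true_eq, Bool.or_eq_true, Bool.and_eq_true, beq_iff_eq]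
  match v with
  | [] => simp
  | [u] => simp
  | u :: w :: x :: t => simp
  | [u, w] =>
      show (2 = 2 ∧ _) ↔ _
      rw [show PySem.List.pyGetD [u, w] 1 "" = w from rfl,
          show PySem.List.pyGetD [u, w] 0 "" = u from rfl]
      constructor
      · rintro ⟨-, h | h⟩
        · rcases h with ⟨h1, h2⟩
          rw [bang_iff] at h1
          exact Or.inl ⟨h1.1, by rw [h2, ← h1.2]⟩
        · rcases h with ⟨h1, h2⟩
          rw [bang_iff] at h1
          exact Or.inr ⟨h1.1, by rw [h2, ← h1.2]⟩
      · rintro (⟨h1, h2⟩ | ⟨h1, h2⟩)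
        · rw [List.cons.injEq, List.cons.injEq] at h2
          refine ⟨rfl, Or.inl ⟨?_, h2.1⟩⟩
          rw [bang_iff]
          exact ⟨h1, h2.2.1⟩
        · rw [List.cons.injEq, List.cons.injEq] at h2
          refine ⟨rfl, Or.inr ⟨?_, h2.2.1⟩⟩
          rw [bang_iff]
          exact ⟨h1, h2.1⟩

lemma rawP_pair (a b : String) (v : List String) :
    rawP [a, b] v = (decide (v.length = 2 ∧
      ((a = "!" ++ PySem.List.pyGetD v 1 "" ∧ PySem.List.pyGetD v 0 "" = "!" ++ b) ∨
       (b = "!" ++ PySem.List.pyGetD v 0 "" ∧ PySem.List.pyGetD v 1 "" = "!" ++ a)))) := by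
  simp [rawP, PySem.List.pyGetD]

lemma rawP_not2 (c d : List String) (h : c.length ≠ 2) : rawP c d = false := by
  simp [rawP, h]

lemma mem_foldl_keep {α : Type} (st : List Int) :
    ∀ (xs : List (Int × α)) (acc : List α) (y : α),
    y ∈ xs.foldl (fun acc p => if p.1 ∈ st then acc else acc ++ [p.2]) acc →
    y ∈ acc ∨ ∃ p ∈ xs, y = p.2 := by
  intro xs
  induction xs with
  | nil => intro acc y hy; exact Or.inl hy
  | cons x t ih =>
      intro acc y hy
      simp only [List.foldl_cons] at hy
      rcases ih _ y hy with h | ⟨p, hp, rfl⟩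
      · by_cases hx : x.1 ∈ st
        · rw [if_pos hx] at h
          exact Or.inl h
        · rw [if_neg hx] at h
          rcases List.mem_append.mp h with h' | h'
          · exact Or.inl h'
          · exact Or.inr ⟨x, by simp, List.mem_singleton.mp h'⟩
      · exact Or.inr ⟨p, by simp [hp], rfl⟩

lemma candB (L : List (List String)) (k : Nat) (P : Int × List String → Bool)
    (hP : ∀ (s : Int) (t : List String), P (s, t) = P (0, t)) :
    ((PySem.List.enumerate (L.drop k) (k : Int)).filter P).map (·.1)
    = ((PySem.List.enumerate (L.drop k) 0).filter P).map (fun q => q.1 + (k : Int)) := by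
  rw [enumerate_shift (L.drop k) (k : Int), List.filter_map, List.map_map]
  have hfc : List.filter (P ∘ fun p => (p.1 + (k : Int), p.2)) (PySem.List.enumerate (L.drop k) 0)
      = List.filter P (PySem.List.enumerate (L.drop k) 0) := by
    apply List.filter_congr
    intro x _
    show P (x.1 + (k : Int), x.2) = P x
    rw [hP, ← hP x.1 x.2]
  rw [hfc]
  rfl

lemma foldB (L : List (List String)) (k : Nat) (a : String)
    (M : List (Int × List String))
    (hM : ∀ q ∈ M, ∃ (r : Nat) (h : k + r < L.length), q.1 = (r : Int) ∧ q.2 = L[k + r]'h)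
    (r0 : List Int) (c0 : List String) :
    List.foldl (fun (acc2 : List Int × List String) kk =>
        (acc2.1 ++ [(k : Int), kk],
         acc2.2 ++ [PySem.Str.replace a "!" "" ++ " & " ++
             PySem.Str.replace (PySem.List.pyGetD (PySem.List.pyGetD L kk []) 0 "") "!" ""]))
      (r0, c0) (M.map (fun q => q.1 + (k : Int)))
    = (r0 ++ M.flatMap (fun q => [(k : Int), q.1 + (k : Int)]),
       c0 ++ M.map (fun q => PySem.Str.replace a "!" "" ++ " & " ++
           PySem.Str.replace (PySem.List.pyGetD q.2 0 "") "!" "")) := by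
  induction M generalizing r0 c0 with
  | nil => simp
  | cons q t ih =>
      obtain ⟨r, hrk, hq1, hq2⟩ := hM q (by simp)
      simp only [List.map_cons, List.foldl_cons, List.flatMap_cons]
      rw [ih (fun x hx => hM x (by simp [hx]))]
      have e2 : PySem.List.pyGetD L (q.1 + (k : Int)) [] = q.2 := by
        have hcast : q.1 + (k : Int) = ((k + r : Nat) : Int) := by rw [hq1]; push_cast; ring
        rw [hcast, PySem.List.pyGetD_natCast, List.getD_eq_getElem L [] hrk, ← hq2]
      rw [e2]
      simp [List.append_assoc]

-- the generic "(acc.1 ++ f p, acc.2 ++ g p)" fold as a pair of flatMaps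
lemma foldl_pair_flat {α β γ : Type} (f : α → List β) (g : α → List γ) :
    ∀ (xs : List α) (r0 : List β) (c0 : List γ),
    xs.foldl (fun (acc : List β × List γ) p => (acc.1 ++ f p, acc.2 ++ g p)) (r0, c0)
      = (r0 ++ xs.flatMap f, c0 ++ xs.flatMap g) := by
  intro xs
  induction xs with
  | nil => simp
  | cons x t ih => intro r0 c0; simp [ih]

-- A's inner fold over the tail slice, in closed form (per outer element p ∈ enumerate L 0)
lemma stepA (L : List (List String)) (acc : List Int × List String)
    (p : Int × List String) (hp : p ∈ PySem.List.enumerate L 0) :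
    List.foldl
      (fun acc2 q =>
        if p.2.length ≠ 2 ∨ q.2.length ≠ 2 then acc2
        else
          if PySem.List.pyGetD p.2 0 "" = "!" ++ PySem.List.pyGetD q.2 1 "" ∧
                PySem.List.pyGetD q.2 0 "" = "!" ++ PySem.List.pyGetD p.2 1 "" ∨
              PySem.List.pyGetD p.2 1 "" = "!" ++ PySem.List.pyGetD q.2 0 "" ∧
                PySem.List.pyGetD q.2 1 "" = "!" ++ PySem.List.pyGetD p.2 0 "" then
            (acc2.1 ++ [p.1, q.1],
              acc2.2 ++ [PySem.Str.replace (PySem.List.pyGetD p.2 0 "") "!" "" ++ " & " ++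
                  PySem.Str.replace (PySem.List.pyGetD q.2 0 "") "!" ""])
          else acc2)
      acc (PySem.List.enumerate (PySem.List.slice L (some p.1) (some (L.length : Int))) 0)
    = (acc.1 ++ (Ftail L p.1.toNat p.2).flatMap (fun q => [p.1, q.1]),
       acc.2 ++ (Ftail L p.1.toNat p.2).map (fun q => combStr p.2 q.2)) := by
  obtain ⟨r0, c0⟩ := acc
  rw [PySem.List.mem_enumerate_iff] at hp
  obtain ⟨k, hk, rfl⟩ := hp
  simp only [zero_add]
  have htn : ((k : Int)).toNat = k := by simp
  have hslice : PySem.List.slice L (some (k : Int)) (some (L.length : Int)) = L.drop k := by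
    rw [PySem.List.slice_natCast]
    exact List.take_of_length_le (by simp)
  rw [hslice, htn]
  rw [PySem.List.foldl_congr_mem _ _
      (fun (acc2 : List Int × List String) (q : Int × List String) =>
        if rawP L[k] q.2 then
          (acc2.1 ++ [(k : Int), q.1], acc2.2 ++ [combStr L[k] q.2]) else acc2)
      (r0, c0) ?_]
  · exact foldl_push _ _ _ _ r0 c0
  · intro acc2 q _
    beta_reduce
    by_cases h2 : L[k].length = 2 ∧ q.2.length = 2
    · by_cases hcond : (PySem.List.pyGetD L[k] 0 "" = "!" ++ PySem.List.pyGetD q.2 1 "" ∧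
          PySem.List.pyGetD q.2 0 "" = "!" ++ PySem.List.pyGetD L[k] 1 "") ∨
          (PySem.List.pyGetD L[k] 1 "" = "!" ++ PySem.List.pyGetD q.2 0 "" ∧
           PySem.List.pyGetD q.2 1 "" = "!" ++ PySem.List.pyGetD L[k] 0 "")
      · rw [if_neg (by simp [h2.1, h2.2]), if_pos hcond,
            if_pos (by simp only [rawP, decide_eq_true_eq]; exact ⟨h2.1, h2.2, hcond⟩)]
        rfl
      · rw [if_neg (by simp [h2.1, h2.2]), if_neg hcond,
            if_neg (by simp only [rawP, decide_eq_true_eq]; exact fun h => hcond h.2.2)]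
    · rw [if_pos (by tauto),
          if_neg (by simp only [rawP, decide_eq_true_eq]; exact fun h => h2 ⟨h.1, h.2.1⟩)]

-- B's per-clause step (partner computation, dict lookup, merge), in the same closed form
lemma stepB (L : List (List String)) (acc : List Int × List String)
    (p : Int × List String) (hp : p ∈ PySem.List.enumerate L 0) :
    (match p.2 with
      | [a, b] =>
        List.foldl
          (fun acc2 k =>
            (acc2.1 ++ [p.1, k],
              acc2.2 ++ [PySem.Str.replace a "!" "" ++ " & " ++
                  PySem.Str.replace (PySem.List.pyGetD (PySem.List.pyGetD L k []) 0 "") "!" ""]))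
          acc
          (match
            List.map
              (fun q => List.filter (fun kk => decide (p.1 ≤ kk))
                ((List.foldl (fun d kc => d.modify kc.2 [] fun x => x ++ [kc.1]) PySem.Dict.empty
                      (PySem.List.enumerate L 0)).getD q []))
              (if PySem.Str.startswith b "!" = true ∧
                    [PySem.Str.slice b (some 1) none, "!" ++ a] ∉
                      (if PySem.Str.startswith a "!" = true then
                        [["!" ++ b, PySem.Str.slice a (some 1) none]] else []) then
                  (if PySem.Str.startswith a "!" = true then
                    [["!" ++ b, PySem.Str.slice a (some 1) none]] else []) ++
                  [[PySem.Str.slice b (some 1) none, "!" ++ a]]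
                else
                  if PySem.Str.startswith a "!" = true then
                    [["!" ++ b, PySem.Str.slice a (some 1) none]] else []) with
            | [x] => x
            | [x, y] => bmerge x y
            | x => [])
      | x => acc)
    = (acc.1 ++ (Ftail L p.1.toNat p.2).flatMap (fun q => [p.1, q.1 + p.1]),
       acc.2 ++ (Ftail L p.1.toNat p.2).map (fun q => combStr p.2 q.2)) := by
  obtain ⟨r0, c0⟩ := acc
  rw [PySem.List.mem_enumerate_iff] at hp
  obtain ⟨k, hk, rfl⟩ := hp
  simp only [zero_add]
  have htn : ((k : Int)).toNat = k := by simp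
  rw [htn]
  have hpos : ∀ q : List String,
      ((List.foldl (fun d kc => d.modify kc.2 [] fun x => x ++ [kc.1]) PySem.Dict.empty
          (PySem.List.enumerate L 0)).getD q [])
      = ((PySem.List.enumerate L 0).filter (fun kc => kc.2 == q)).map (·.1) :=
    fun q => pos_getD (PySem.List.enumerate L 0) q
  have hmem : ∀ M : List (Int × List String),
      (∀ x ∈ M, x ∈ PySem.List.enumerate (L.drop k) 0) →
      ∀ q ∈ M, ∃ (r : Nat) (h : k + r < L.length), q.1 = (r : Int) ∧ q.2 = L[k + r]'h := by
    intro M hsub q hq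
    have := hsub q hq
    rw [PySem.List.mem_enumerate_iff] at this
    obtain ⟨r, hr, rfl⟩ := this
    refine ⟨r, by simp at hr; omega, by simp, ?_⟩
    exact List.getElem_drop
  rcases hc : L[k] with _ | ⟨a, _ | ⟨b, _ | ⟨c3, t3⟩⟩⟩
  case nil =>
    have hF : Ftail L k ([] : List String) = [] := by
      simp [Ftail, List.filter_eq_nil_iff, rawP_not2]
    rw [hF]; simp
  case cons.nil =>
    have hF : Ftail L k [a] = [] := by
      simp [Ftail, List.filter_eq_nil_iff, rawP_not2]
    rw [hF]; simp
  case cons.cons.cons =>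
    have hF : Ftail L k (a :: b :: c3 :: t3) = [] := by
      have : (a :: b :: c3 :: t3).length ≠ 2 := by simp
      simp [Ftail, List.filter_eq_nil_iff, rawP_not2 _ _ this]
    rw [hF]; simp
  case cons.cons.nil =>
    dsimp only
    -- the partner-membership filter over the tail equals Ftail's rawP filter
    have hFeq : ∀ (pr : (Int × List String) → Bool),
        (∀ v : List String, ∀ s : Int, pr (s, v)
          = ((PySem.Str.startswith a "!" && v == ["!" ++ b, PySem.Str.slice a (some 1) none]) ||
             (PySem.Str.startswith b "!" && v == [PySem.Str.slice b (some 1) none, "!" ++ a]))) →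
        (PySem.List.enumerate (L.drop k) 0).filter pr = Ftail L k [a, b] := by
      intro pr hpr
      unfold Ftail
      apply List.filter_congr
      intro x _
      rw [show pr x = pr (x.1, x.2) from rfl, hpr, rawP_pair, P_char]
    by_cases hsa : PySem.Str.startswith a "!" = true
    · by_cases hsb : PySem.Str.startswith b "!" = true
      · by_cases hp12 : ([PySem.Str.slice b (some 1) none, "!" ++ a] : List String)
            = ["!" ++ b, PySem.Str.slice a (some 1) none]
        · rw [if_pos hsa, if_neg (fun h => h.2 (List.mem_singleton.mpr hp12))]
          simp only [List.map_cons, List.map_nil]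
          rw [hpos, occ_ge L _ k (le_of_lt hk),
              candB L k (fun kc => kc.2 == ["!" ++ b, PySem.Str.slice a (some 1) none]) (fun s t => rfl),
              ← hFeq (fun kc => kc.2 == ["!" ++ b, PySem.Str.slice a (some 1) none]) ?_]
          · exact foldB L k a _ (hmem _ (fun x hx => List.mem_of_mem_filter hx)) r0 c0
          · intro v s
            rw [hsa, hsb, ← hp12]
            simp [Bool.or_self]
        · rw [if_pos hsa, if_pos ⟨hsb, by simp [hp12]⟩]
          simp only [List.cons_append, List.nil_append, List.map_cons, List.map_nil]
          rw [hpos, hpos, occ_ge L _ k (le_of_lt hk), occ_ge L _ k (le_of_lt hk)]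
          rw [bmerge_filter _ _ ?_ _ (PySem.List.pairwise_lt_enumerate _ _)]
          · rw [candB L k (fun kc => kc.2 == ["!" ++ b, PySem.Str.slice a (some 1) none] ||
                  kc.2 == [PySem.Str.slice b (some 1) none, "!" ++ a]) (fun s t => rfl),
                ← hFeq (fun kc => kc.2 == ["!" ++ b, PySem.Str.slice a (some 1) none] ||
                  kc.2 == [PySem.Str.slice b (some 1) none, "!" ++ a]) ?_]
            · exact foldB L k a _ (hmem _ (fun x hx => List.mem_of_mem_filter hx)) r0 c0
            · intro v s
              rw [hsa, hsb]
              simp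
          · intro x hx
            rw [beq_iff_eq, beq_iff_eq] at hx
            exact hp12 (hx.2.symm.trans hx.1)
      · rw [if_pos hsa, if_neg (fun h => hsb h.1)]
        simp only [List.map_cons, List.map_nil]
        rw [hpos, occ_ge L _ k (le_of_lt hk),
            candB L k (fun kc => kc.2 == ["!" ++ b, PySem.Str.slice a (some 1) none]) (fun s t => rfl),
            ← hFeq (fun kc => kc.2 == ["!" ++ b, PySem.Str.slice a (some 1) none]) ?_]
        · exact foldB L k a _ (hmem _ (fun x hx => List.mem_of_mem_filter hx)) r0 c0
        · intro v s
          rw [hsa, eq_false_of_ne_true hsb]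
          simp
    · by_cases hsb : PySem.Str.startswith b "!" = true
      · rw [if_neg hsa, if_pos ⟨hsb, by simp⟩]
        simp only [List.nil_append, List.map_cons, List.map_nil]
        rw [hpos, occ_ge L _ k (le_of_lt hk),
            candB L k (fun kc => kc.2 == [PySem.Str.slice b (some 1) none, "!" ++ a]) (fun s t => rfl),
            ← hFeq (fun kc => kc.2 == [PySem.Str.slice b (some 1) none, "!" ++ a]) ?_]
        · exact foldB L k a _ (hmem _ (fun x hx => List.mem_of_mem_filter hx)) r0 c0
        · intro v s
          rw [hsb, eq_false_of_ne_true hsa]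
          simp
      · rw [if_neg hsa, if_neg (fun h => hsb h.1)]
        simp only [List.map_nil]
        have hF : Ftail L k [a, b] = [] := by
          rw [← hFeq (fun _ => false) ?_]
          · simp
          · intro v s
            rw [eq_false_of_ne_true hsa, eq_false_of_ne_true hsb]
            simp
        rw [hF]
        simp

-- matchedPairs, per source clause, in terms of Ftail
lemma pvClauseSort_eq (lst : List (List String)) :
    pvClauseSort lst
      = PySem.List.sorted (lst.map (fun i => PySem.List.sorted i (fun x => x) false))
          (fun x => PySem.List.pyGetD x 0 "") false := by
  unfold pvClauseSort
  have h1 : (fun (x : List String) => PySem.List.pyGetD x 0 "")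
      = (fun (c : List String) => List.headD c "") := by
    funext x
    cases x <;> simp [PySem.List.pyGetD, PySem.List.pyGet?, PySem.List.pyIdx?]
  rw [h1]
  rfl

lemma compl_eq_rawP (c d : List String) : pvCompl c d = rawP c d := by
  rcases c with _ | ⟨a, _ | ⟨b, _ | ⟨c3, t3⟩⟩⟩ <;>
    rcases d with _ | ⟨x, _ | ⟨y, _ | ⟨d3, u3⟩⟩⟩ <;>
      simp only [pvCompl, pvG, rawP, PySem.List.pyGetD, PySem.List.pyIdx?] <;>
        first
          | (simp; done)
          | (symm; simp; done)
          | (show (decide _ && decide _ && _) = decide _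
             rw [Bool.eq_iff_iff, decide_eq_true_eq]
             simp only [Bool.or_eq_true, Bool.and_eq_true, beq_iff_eq,
               decide_eq_true_eq, List.getD]
             constructor
             · rintro ⟨-, h⟩
               exact ⟨rfl, rfl, h⟩
             · rintro ⟨-, -, h⟩
               exact ⟨⟨rfl, rfl⟩, h⟩)

lemma filt_ge (L : List (List String)) (k : Nat) (hk : k ≤ L.length) (P : List String → Bool) :
    (PySem.List.enumerate L 0).filter (fun q => decide ((k : Int) ≤ q.1) && P q.2)
      = (PySem.List.enumerate (L.drop k) (k : Int)).filter (fun q => P q.2) := by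
  have hsplit : PySem.List.enumerate L 0
      = PySem.List.enumerate (L.take k) 0 ++ PySem.List.enumerate (L.drop k) (k : Int) := by
    conv_lhs => rw [← List.take_append_drop k L]
    rw [PySem.List.enumerate_append]
    congr 2
    simp [List.length_take, Nat.min_eq_left hk]
  rw [hsplit, List.filter_append]
  have h1 : (PySem.List.enumerate (L.take k) 0).filter
      (fun q => decide ((k : Int) ≤ q.1) && P q.2) = [] := by
    rw [List.filter_eq_nil_iff]
    intro x hx
    rw [PySem.List.mem_enumerate_iff] at hx
    obtain ⟨r, hr, rfl⟩ := hx
    have hrk : r < k := by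
      simp [List.length_take] at hr
      omega
    simp
    intro h
    omega
  have h2 : (PySem.List.enumerate (L.drop k) (k : Int)).filter
      (fun q => decide ((k : Int) ≤ q.1) && P q.2)
      = (PySem.List.enumerate (L.drop k) (k : Int)).filter (fun q => P q.2) := by
    apply List.filter_congr
    intro x hx
    rw [PySem.List.mem_enumerate_iff] at hx
    obtain ⟨r, hr, rfl⟩ := hx
    simp
  rw [h1, h2, List.nil_append]

-- key-function bridge (Python x[0] on nonempty / default on empty vs List.headD)
lemma key_eq : (fun (x : List String) => PySem.List.pyGetD x 0 "")
    = (fun (c : List String) => c.headD "") := by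
  funext x
  cases x <;> simp [PySem.List.pyGetD, PySem.List.pyGet?, PySem.List.pyIdx?]

-- pvRem, per source clause, in terms of Ftail (generic in the recorded second index)
lemma pvRem_char (L : List (List String)) (f : Int → Int → Int) :
    pvRem L f = (PySem.List.enumerate L 0).flatMap
      (fun p => (Ftail L p.1.toNat p.2).flatMap (fun q => [p.1, f p.1 (q.1 + p.1)])) := by
  unfold pvRem
  apply List.flatMap_congr
  intro p hp
  rw [PySem.List.mem_enumerate_iff] at hp
  obtain ⟨k, hk, rfl⟩ := hp
  simp only [zero_add]
  have htn : ((k : Int)).toNat = k := by simp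
  rw [htn]
  have hP : (fun (q : Int × List String) => decide ((k : Int) ≤ q.1) && pvCompl L[k] q.2)
      = (fun q => decide ((k : Int) ≤ q.1) && rawP L[k] q.2) := by
    funext q
    rw [compl_eq_rawP]
  rw [hP, filt_ge L k (le_of_lt hk) (fun v => rawP L[k] v),
      enumerate_shift (L.drop k) (k : Int), List.filter_map]
  have hfc : List.filter ((fun q => rawP L[k] q.2) ∘ fun p => (p.1 + (k : Int), p.2))
      (PySem.List.enumerate (L.drop k) 0)
      = List.filter (fun q => rawP L[k] q.2) (PySem.List.enumerate (L.drop k) 0) := by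
    apply List.filter_congr
    intro x _
    rfl
  rw [hfc, List.flatMap_map]
  rfl

-- A's and B's removal lists and combined strings over a given sorted clause list
def remA (L : List (List String)) : List Int :=
  (PySem.List.enumerate L 0).flatMap
    (fun p => (Ftail L p.1.toNat p.2).flatMap (fun q => [p.1, q.1]))

def remB (L : List (List String)) : List Int :=
  (PySem.List.enumerate L 0).flatMap
    (fun p => (Ftail L p.1.toNat p.2).flatMap (fun q => [p.1, q.1 + p.1]))

def combsL (L : List (List String)) : List String :=
  (PySem.List.enumerate L 0).flatMap
    (fun p => (Ftail L p.1.toNat p.2).map (fun q => combStr p.2 q.2))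

def km (L : List (List String)) (r : List Int) : List (List String) :=
  ((PySem.List.enumerate L 0).filter fun p => !r.contains p.1).map Prod.snd

lemma pvRem_eq_A (L : List (List String)) : pvRem L (fun i j => j - i) = remA L := by
  rw [pvRem_char]
  unfold remA
  apply List.flatMap_congr
  intro p _
  apply List.flatMap_congr
  intro q _
  simp

lemma pvRem_eq_B (L : List (List String)) : pvRem L (fun _ j => j) = remB L := by
  rw [pvRem_char]
  rfl

-- the keep-fold as a filter over the enumeration
lemma keepf {α : Type} (r : List Int) :
    ∀ (xs : List (Int × α)) (acc : List α),
    xs.foldl (fun acc p => if p.1 ∈ r then acc else acc ++ [p.2]) acc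
      = acc ++ (xs.filter fun p => !r.contains p.1).map Prod.snd := by
  intro xs
  induction xs with
  | nil => intro acc; simp
  | cons x t ih =>
      intro acc
      by_cases hm : x.1 ∈ r <;> simp [hm, ih]

-- ===== the stable sort is determined by its per-key filters =====

lemma insertBy_pairwise {α : Type} (key : α → String) (x : α) (ys : List α)
    (h : ys.Pairwise (fun a b => key a ≤ key b)) :
    (PySem.List.insertBy (fun a b => decide (key a < key b)) x ys).Pairwise
      (fun a b => key a ≤ key b) := by
  induction ys with
  | nil => simp [PySem.List.insertBy]
  | cons y t ih =>
      rw [List.pairwise_cons] at h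
      by_cases hx : key x < key y
      · rw [show PySem.List.insertBy (fun a b => decide (key a < key b)) x (y :: t)
            = x :: y :: t from by simp [PySem.List.insertBy, hx]]
        rw [List.pairwise_cons]
        refine ⟨?_, List.pairwise_cons.mpr h⟩
        intro z hz
        rcases List.mem_cons.mp hz with rfl | hz'
        · exact le_of_lt hx
        · exact le_trans (le_of_lt hx) (h.1 z hz')
      · rw [show PySem.List.insertBy (fun a b => decide (key a < key b)) x (y :: t)
            = y :: PySem.List.insertBy (fun a b => decide (key a < key b)) x t from by
          simp [PySem.List.insertBy, hx]]
        rw [List.pairwise_cons]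
        refine ⟨?_, ih h.2⟩
        intro z hz
        rcases (PySem.List.mem_insertBy _ _ _ _).mp hz with rfl | hz'
        · exact le_of_not_gt hx
        · exact h.1 z hz'

lemma insertBy_filter {α : Type} (key : α → String) (v : String) (x : α) (ys : List α)
    (h : ys.Pairwise (fun a b => key a ≤ key b)) :
    (PySem.List.insertBy (fun a b => decide (key a < key b)) x ys).filter
        (fun y => key y == v)
      = if key x == v then ys.filter (fun y => key y == v) ++ [x]
        else ys.filter (fun y => key y == v) := by
  induction ys with
  | nil =>
      by_cases hv : key x == v <;> simp [PySem.List.insertBy, List.filter, hv]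
  | cons y t ih =>
      rw [List.pairwise_cons] at h
      by_cases hx : key x < key y
      · rw [show PySem.List.insertBy (fun a b => decide (key a < key b)) x (y :: t)
            = x :: y :: t from by simp [PySem.List.insertBy, hx]]
        have hempty : (y :: t).filter (fun y => key y == v) = []
            ∨ (key x == v) = false := by
          by_cases hv : key x = v
          · left
            rw [List.filter_eq_nil_iff]
            intro z hz
            have hzk : key y ≤ key z := by
              rcases List.mem_cons.mp hz with rfl | hz'
              · exact le_refl _
              · exact h.1 z hz'
            have : v < key z := lt_of_lt_of_le (hv ▸ hx) hzk
            simp only [beq_iff_eq]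
            intro hzv
            exact absurd (hzv ▸ this) (lt_irrefl v)
          · right
            simp [hv]
        rcases hempty with he | he
        · by_cases hv : key x == v <;> simp [List.filter_cons, he, hv]
        · simp [List.filter_cons, he]
      · rw [show PySem.List.insertBy (fun a b => decide (key a < key b)) x (y :: t)
            = y :: PySem.List.insertBy (fun a b => decide (key a < key b)) x t from by
          simp [PySem.List.insertBy, hx]]
        rw [List.filter_cons, List.filter_cons, ih h.2]
        by_cases hyv : key y == v <;> by_cases hxv : key x == v <;>
          simp [hyv, hxv]

lemma foldl_insert_filter {α : Type} (key : α → String) (v : String) :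
    ∀ (xs : List α) (acc : List α), acc.Pairwise (fun a b => key a ≤ key b) →
    (xs.foldl (fun acc x =>
        PySem.List.insertBy (fun a b => decide (key a < key b)) x acc) acc).filter
      (fun y => key y == v)
      = acc.filter (fun y => key y == v) ++ xs.filter (fun y => key y == v) := by
  intro xs
  induction xs with
  | nil => intro acc _; simp
  | cons x t ih =>
      intro acc hacc
      rw [List.foldl_cons, ih _ (insertBy_pairwise key x acc hacc),
          insertBy_filter key v x acc hacc, List.filter_cons]
      by_cases hv : key x == v <;> simp [hv]

lemma sorted_filter {α : Type} (xs : List α) (key : α → String) (v : String) :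
    (PySem.List.sorted xs key false).filter (fun y => key y == v)
      = xs.filter (fun y => key y == v) := by
  rw [PySem.List.sorted_eq_foldl_insertBy, foldl_insert_filter key v xs [] (by simp)]
  simp

lemma eq_of_pairwise_filter {α : Type} (key : α → String) :
    ∀ (l1 l2 : List α), l1.Pairwise (fun a b => key a ≤ key b) →
    l2.Pairwise (fun a b => key a ≤ key b) →
    (∀ v, l1.filter (fun y => key y == v) = l2.filter (fun y => key y == v)) →
    l1 = l2 := by
  intro l1
  induction l1 with
  | nil =>
      intro l2 _ _ hf
      cases l2 with
      | nil => rfl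
      | cons b bs =>
          have := hf (key b)
          simp at this
  | cons a as ih =>
      intro l2 h1 h2 hf
      cases l2 with
      | nil =>
          have := hf (key a)
          simp at this
      | cons b bs =>
          rw [List.pairwise_cons] at h1 h2
          have hmema : a ∈ (b :: bs).filter (fun y => key y == key a) := by
            rw [← hf (key a), List.filter_cons, if_pos (by simp)]
            exact List.mem_cons_self
          have h1le : key b ≤ key a := by
            rcases List.mem_cons.mp (List.mem_of_mem_filter hmema) with rfl | hz'
            · exact le_refl _
            · exact h2.1 a hz'
          have hmemb : b ∈ (a :: as).filter (fun y => key y == key b) := by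
            rw [hf (key b), List.filter_cons, if_pos (by simp)]
            exact List.mem_cons_self
          have h2le : key a ≤ key b := by
            rcases List.mem_cons.mp (List.mem_of_mem_filter hmemb) with rfl | hw'
            · exact le_refl _
            · exact h1.1 b hw'
          have hk : key a = key b := le_antisymm h2le h1le
          have hfa := hf (key a)
          rw [List.filter_cons, List.filter_cons, if_pos (by simp),
              if_pos (by simp [hk])] at hfa
          obtain ⟨hab, htail⟩ := List.cons_eq_cons.mp hfa
          rw [hab]
          congr 1
          apply ih bs h1.2 h2.2
          intro v
          by_cases hv : v = key a
          · rw [hv]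
            exact htail
          · have hfv := hf v
            rw [List.filter_cons, List.filter_cons,
                if_neg (by simp; intro h; exact hv h.symm),
                if_neg (by simp; intro h; rw [← hk] at h; exact hv h.symm)] at hfv
            exact hfv

lemma sorted_eq_of_filter {α : Type} (xs ys : List α) (key : α → String)
    (hf : ∀ v, xs.filter (fun y => key y == v) = ys.filter (fun y => key y == v)) :
    PySem.List.sorted xs key false = PySem.List.sorted ys key false := by
  apply eq_of_pairwise_filter key _ _ (PySem.List.sorted_pairwise xs key)
    (PySem.List.sorted_pairwise ys key)
  intro v
  rw [sorted_filter, sorted_filter]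
  exact hf v

lemma filter_of_sorted_eq {α : Type} {xs ys : List α} {key : α → String}
    (h : PySem.List.sorted xs key false = PySem.List.sorted ys key false) (v : String) :
    xs.filter (fun y => key y == v) = ys.filter (fun y => key y == v) := by
  rw [← sorted_filter xs key v, h, sorted_filter]

lemma sorted_append_cancel {α : Type} (xs ys c : List α) (key : α → String) :
    (PySem.List.sorted (xs ++ c) key false = PySem.List.sorted (ys ++ c) key false)
      ↔ PySem.List.sorted xs key false = PySem.List.sorted ys key false := by
  constructor
  · intro h
    apply sorted_eq_of_filter
    intro v
    have h' := filter_of_sorted_eq h v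
    rw [List.filter_append, List.filter_append] at h'
    exact List.append_cancel_right h'
  · intro h
    apply sorted_eq_of_filter
    intro v
    rw [List.filter_append, List.filter_append, filter_of_sorted_eq h v]

lemma map_sorted_final (L : List (List String))
    (hL : ∀ x ∈ L, PySem.List.sorted x (fun y => y) false = x)
    (rem : List Int) (cmb : List String) :
    (((PySem.List.enumerate L 0).foldl
        (fun acc p => if p.1 ∈ rem then acc else acc ++ [p.2]) []) ++
        cmb.map (fun x => [x])).map (fun i => PySem.List.sorted i (fun x => x))
    = ((PySem.List.enumerate L 0).foldl
        (fun acc p => if p.1 ∈ rem then acc else acc ++ [p.2]) []) ++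
        cmb.map (fun x => [x]) := by
  have h : ∀ x ∈ (((PySem.List.enumerate L 0).foldl
      (fun acc p => if p.1 ∈ rem then acc else acc ++ [p.2]) []) ++ cmb.map (fun x => [x])),
      PySem.List.sorted x (fun y => y) false = id x := by
    intro x hx
    rcases List.mem_append.mp hx with h1 | h2
    · rcases mem_foldl_keep rem _ _ x h1 with h' | ⟨pp, hpp, rfl⟩
      · simp at h'
      · rw [PySem.List.mem_enumerate_iff] at hpp
        obtain ⟨r, hr, rfl⟩ := hpp
        exact hL _ (List.getElem_mem hr)
    · obtain ⟨s', _, rfl⟩ := List.mem_map.mp h2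
      exact PySem.List.sorted_eq_self_of_pairwise _ _ (by simp)
  rw [List.map_congr_left h, List.map_id]

-- output characterizations: both ports as 'sorted (kept ++ combined-clauses)'
lemma A_out (lst : List (List String)) :
    combine_expressions lst
      = PySem.List.sorted (km (pvClauseSort lst) (remA (pvClauseSort lst))
            ++ (combsL (pvClauseSort lst)).map (fun x => [x]))
          (fun x => PySem.List.pyGetD x 0 "") false := by
  unfold combine_expressions
  dsimp only
  rw [← pvClauseSort_eq lst]
  set L := pvClauseSort lst with hL
  set E := PySem.List.enumerate L 0 with hE
  have hA : E.foldl (fun (acc : List Int × List String) p =>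
      (PySem.List.enumerate (PySem.List.slice L (some p.1) (some (L.length : Int))) 0).foldl
        (fun acc2 q =>
          if p.2.length ≠ 2 ∨ q.2.length ≠ 2 then acc2
          else if (PySem.List.pyGetD p.2 0 "" = "!" ++ PySem.List.pyGetD q.2 1 "" ∧
                   PySem.List.pyGetD q.2 0 "" = "!" ++ PySem.List.pyGetD p.2 1 "") ∨
                  (PySem.List.pyGetD p.2 1 "" = "!" ++ PySem.List.pyGetD q.2 0 "" ∧
                   PySem.List.pyGetD q.2 1 "" = "!" ++ PySem.List.pyGetD p.2 0 "")
          then (acc2.1 ++ [p.1, q.1],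
                acc2.2 ++ [PySem.Str.replace (PySem.List.pyGetD p.2 0 "") "!" "" ++ " & " ++
                           PySem.Str.replace (PySem.List.pyGetD q.2 0 "") "!" ""])
          else acc2) acc) ([], [])
      = (remA L, combsL L) := by
    rw [PySem.List.foldl_congr_mem _ _
        (fun (acc : List Int × List String) p =>
          (acc.1 ++ (Ftail L p.1.toNat p.2).flatMap (fun q => [p.1, q.1]),
           acc.2 ++ (Ftail L p.1.toNat p.2).map (fun q => combStr p.2 q.2)))
        ([], []) (fun acc p hp => stepA L acc p hp)]
    rw [foldl_pair_flat]
    unfold remA combsL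
    rw [← hE]
    simp
  rw [hA]
  rw [map_sorted_final L ?_ (remA L) (combsL L)]
  · rw [keepf (remA L) E []]
    rfl
  · intro x hx
    rw [hL] at hx
    unfold pvClauseSort at hx
    rw [PySem.List.mem_sorted] at hx
    obtain ⟨c, _, rfl⟩ := List.mem_map.mp hx
    exact PySem.List.sorted_sorted c _

lemma B_out (lst : List (List String)) :
    combine_expressions_alt lst
      = PySem.List.sorted (km (pvClauseSort lst) (remB (pvClauseSort lst))
            ++ (combsL (pvClauseSort lst)).map (fun x => [x]))
          (fun x => PySem.List.pyGetD x 0 "") false := by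
  unfold combine_expressions_alt
  dsimp only
  rw [← pvClauseSort_eq lst]
  set L := pvClauseSort lst with hL
  set E := PySem.List.enumerate L 0 with hE
  have hB : E.foldl (fun (acc : List Int × List String) p =>
      match p.2 with
      | [a, b] =>
        let partners := if PySem.Str.startswith a "!" then
            [["!" ++ b, PySem.Str.slice a (some 1) none]] else []
        let p2 := [PySem.Str.slice b (some 1) none, "!" ++ a]
        let partners := if PySem.Str.startswith b "!" ∧ p2 ∉ partners then
            partners ++ [p2] else partners
        let lists := partners.map (fun q =>
            (((E.foldl (fun (d : PySem.Dict (List String) (List Int)) kc =>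
                d.modify kc.2 [] (· ++ [kc.1])) PySem.Dict.empty)).getD q []).filter
              (fun k => p.1 ≤ k))
        let cand := match lists with
          | [x] => x
          | [x, y] => bmerge x y
          | _ => []
        cand.foldl (fun acc2 k =>
          (acc2.1 ++ [p.1, k],
           acc2.2 ++ [PySem.Str.replace a "!" "" ++ " & " ++
                      PySem.Str.replace (PySem.List.pyGetD (PySem.List.pyGetD L k []) 0 "") "!" ""]))
          acc
      | _ => acc) ([], [])
      = (remB L, combsL L) := by
    rw [PySem.List.foldl_congr_mem _ _
        (fun (acc : List Int × List String) p =>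
          (acc.1 ++ (Ftail L p.1.toNat p.2).flatMap (fun q => [p.1, q.1 + p.1]),
           acc.2 ++ (Ftail L p.1.toNat p.2).map (fun q => combStr p.2 q.2)))
        ([], []) (fun acc p hp => stepB L acc p hp)]
    rw [foldl_pair_flat]
    unfold remB combsL
    rw [← hE]
    simp
  rw [hB]
  rw [keepf (remB L) E []]
  rfl

lemma D_iff (lst : List (List String)) :
    D_combine_expressions lst ↔
      ¬ (PySem.List.sorted (km (pvClauseSort lst) (remA (pvClauseSort lst)))
            (fun x => PySem.List.pyGetD x 0 "") false
          = PySem.List.sorted (km (pvClauseSort lst) (remB (pvClauseSort lst)))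
            (fun x => PySem.List.pyGetD x 0 "") false) := by
  simp only [D_combine_expressions, pvKept, km]
  rw [pvRem_eq_A, pvRem_eq_B, key_eq]

-- ===== VERDICT (by name: the statement is the Claim_ definition above) =====
theorem combine_expressions_spec : Claim_unchanged_combine_expressions := by
  intro lst _hdom _hpre hnD
  rw [A_out, B_out]
  exact (sorted_append_cancel _ _ _ _).mpr
    (not_not.mp (fun hx => hnD ((D_iff lst).mpr hx)))

theorem combine_expressions_changed : Claim_changed_combine_expressions := by
  unfold Claim_changed_combine_expressions
  refine ⟨by decide, by decide, ?_, ?_, ?_, by decide⟩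
  · unfold D_combine_expressions pvKept pvClauseSort pvDiffWitness_combine_expressions
    simp only [sorted_str_bridge]
    decide
  · unfold combine_expressions pvDiffWitness_combine_expressions
      pvDiffWitnessOut_combine_expressions
    simp only [sorted_str_bridge]
    decide
  · unfold combine_expressions_alt pvDiffWitness_combine_expressions
      pvDiffWitnessOut_combine_expressions
    simp only [sorted_str_bridge]
    decide

theorem combine_expressions_tight : Claim_exact_combine_expressions := by
  intro lst _hdom _hpre hD heq
  rw [A_out, B_out] at heq
  exact (D_iff lst).mp hD ((sorted_append_cancel _ _ _ _).mp heq)
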